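-- pv_equiv track=rewrite | github.com/MarukuruandJill/GoogleSTEP | day1/anagram2.py | anagram2_solution
-- ===== SOURCE A (Python) =====
-- from collections import defaultdict
--
-- def anagram2_solution(random_word, dictionary):
--     random_word_map = defaultdict(int)
--     for char in random_word:
--         random_word_map[char] += 1
--
--     # res = []
--     res = ""
--     max_score = 0
--     for word in dictionary:
--         word_in_dictionary_map = defaultdict(int)
--         for char in word:
--             word_in_dictionary_map[char] += 1
--
--         is_valid = True
--         for key in word_in_dictionary_map.keys():
--             if word_in_dictionary_map[key] > random_word_map.get(key, 0):
--                 is_valid = False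
--                 break
--
--         if is_valid and max_score <  count_score(word):
--             max_score = count_score(word)
--             res = word
--
--     return res
--
-- def count_score(word):
--     score = 0
--
--     point1 = ["a", "e", "h", "i", "n", "o", "r", "s", "t"]
--     point2 = ["c", "d", "l", "m", "u"]
--     point3 = ["b", "f", "g", "p", "v", "w", "y"]
--     point4 = ["j", "k", "q", "x", "z"]
--
--     for char in word:
--         if char in point1:
--             score += 1
--         if char in point2:
--             score += 2
--         if char in point3:
--             score += 3
--         if char in point4:
--             score += 4
--
--     return score
-- ===== SOURCE B (Python) =====
-- _POINTS = {'a': 1, 'e': 1, 'h': 1, 'i': 1, 'n': 1, 'o': 1, 'r': 1, 's': 1, 't': 1,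
--            'c': 2, 'd': 2, 'l': 2, 'm': 2, 'u': 2,
--            'b': 3, 'f': 3, 'g': 3, 'p': 3, 'v': 3, 'w': 3, 'y': 3,
--            'j': 4, 'k': 4, 'q': 4, 'x': 4, 'z': 4}
--
--
-- def _score(word):
--     return sum(_POINTS.get(ch, 0) for ch in word)
--
--
-- def _fits(need, have):
--     # two-pointer sub-multiset test over two sorted character lists
--     i = 0
--     for c in need:
--         while i < len(have) and have[i] < c:
--             i += 1
--         if i >= len(have) or have[i] != c:
--             return False
--         i += 1
--     return True
--
--
-- def anagram2_solution(random_word, dictionary):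
--     have = sorted(random_word)
--     # stable descending sort: among equal scores, dictionary order is kept
--     ranked = sorted(dictionary, key=_score, reverse=True)
--     for word in ranked:
--         if _fits(sorted(word), have):
--             return word if _score(word) > 0 else ""
--     return ""
-- ===== Notes on version B (the rewrite author's own statement) =====
-- stated objective: alternative
-- what changed: Replaces A's hash-counting single-pass running-max loop by a sorting-based pipeline: stable-sort the dictionary by score descending, sort the letters of random_word and of each candidate, and return the first word of the ranked list whose sorted letters are a sub-multiset of the sorted available letters (two-pointer merge scan), '' when that word scores 0 or none fits.
import Mathlib
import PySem

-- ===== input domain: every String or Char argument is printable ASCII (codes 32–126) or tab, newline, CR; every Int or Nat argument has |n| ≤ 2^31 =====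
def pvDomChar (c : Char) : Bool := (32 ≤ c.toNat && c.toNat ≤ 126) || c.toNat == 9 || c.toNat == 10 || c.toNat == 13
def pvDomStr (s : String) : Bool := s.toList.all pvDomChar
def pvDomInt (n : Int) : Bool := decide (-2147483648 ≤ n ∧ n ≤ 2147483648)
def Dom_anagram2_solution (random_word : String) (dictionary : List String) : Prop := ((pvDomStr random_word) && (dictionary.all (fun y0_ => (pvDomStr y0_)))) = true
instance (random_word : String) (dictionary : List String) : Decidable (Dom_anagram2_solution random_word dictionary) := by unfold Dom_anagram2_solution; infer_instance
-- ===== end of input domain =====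

-- B replaces A's hash-counting running-max loop by a sorting pipeline: stable-sort the dictionary by
-- score descending, sort the letters, and take the first ranked word whose sorted letters fit the
-- sorted available letters by a two-pointer scan (objective: alternative algorithm, same cost class).

-- ===== PORT A =====
-- port of A's helper count_score: four membership tests per character, accumulated in a loop
def pvCountScore (word : String) : Int :=
  word.toList.foldl (fun score char =>
    let point1 : List Char := ['a','e','h','i','n','o','r','s','t']
    let point2 : List Char := ['c','d','l','m','u']
    let point3 : List Char := ['b','f','g','p','v','w','y']
    let point4 : List Char := ['j','k','q','x','z']
    let score := if decide (char ∈ point1) then score + 1 else score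
    let score := if decide (char ∈ point2) then score + 2 else score
    let score := if decide (char ∈ point3) then score + 3 else score
    if decide (char ∈ point4) then score + 4 else score) 0

def anagram2_solution (random_word : String) (dictionary : List String) : String :=
  let random_word_map : PySem.Dict Char Int :=
    random_word.toList.foldl (fun d c => d.modify c 0 (· + 1)) PySem.Dict.empty
  (dictionary.foldl (fun (st : String × Int) word =>
    let word_in_dictionary_map : PySem.Dict Char Int :=
      word.toList.foldl (fun d c => d.modify c 0 (· + 1)) PySem.Dict.empty
    let is_valid := word_in_dictionary_map.keys.all
      (fun k => !decide (word_in_dictionary_map.getD k 0 > random_word_map.getD k 0))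
    if is_valid && decide (st.2 < pvCountScore word) then (word, pvCountScore word) else st)
    ("", 0)).1

-- ===== PORT B =====
-- the _POINTS dict literal of Source B
def pvPoints : PySem.Dict Char Int := PySem.Dict.ofList
  [('a',1),('e',1),('h',1),('i',1),('n',1),('o',1),('r',1),('s',1),('t',1),
   ('c',2),('d',2),('l',2),('m',2),('u',2),
   ('b',3),('f',3),('g',3),('p',3),('v',3),('w',3),('y',3),
   ('j',4),('k',4),('q',4),('x',4),('z',4)]

-- port of Source B's _score: sum of dict lookups
def pvScore (word : String) : Int :=
  (word.toList.map (fun ch => pvPoints.getD ch 0)).sum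

-- port of Source B's _fits: two-pointer scan over two sorted char lists; the Python while-loop that
-- advances the index past smaller characters is ported as dropWhile of that prefix (exact)
def pvFits : List Char → List Char → Bool
  | [], _ => true
  | c :: ws, hs =>
    match hs.dropWhile (fun h => decide (h < c)) with
    | [] => false
    | h :: rest => if h == c then pvFits ws rest else false

def anagram2_solution_alt (random_word : String) (dictionary : List String) : String :=
  let hav := PySem.List.sorted random_word.toList (fun c => c) false
  let ranked := PySem.List.sorted dictionary pvScore true
  -- the for-loop with early return: the first ranked word that fits decides the answer
  match ranked.find? (fun w => pvFits (PySem.List.sorted w.toList (fun c => c) false) hav) with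
  | some w => if pvScore w > 0 then w else ""
  | none => ""

-- ===== PRECONDITION & SPEC =====
def Spec_anagram2_solution (random_word : String) (dictionary : List String) (out : String) : Prop := out = anagram2_solution_alt random_word dictionary
instance (random_word : String) (dictionary : List String) (out : String) : Decidable (Spec_anagram2_solution random_word dictionary out) := by unfold Spec_anagram2_solution; infer_instance

-- ===== CLAIM (what is proved, stated in full; the proofs are below) =====
def Claim_equal_anagram2_solution : Prop := ∀ (random_word : String) (dictionary : List String), Dom_anagram2_solution random_word dictionary → Spec_anagram2_solution random_word dictionary (anagram2_solution random_word dictionary)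

-- ===== LEMMAS AND PROOFS =====

-- A's per-character scoring step adds exactly the _POINTS value of the character
lemma pvStep_eq (s : Int) (c : Char) :
    (let point1 : List Char := ['a','e','h','i','n','o','r','s','t']
     let point2 : List Char := ['c','d','l','m','u']
     let point3 : List Char := ['b','f','g','p','v','w','y']
     let point4 : List Char := ['j','k','q','x','z']
     let s := if decide (c ∈ point1) then s + 1 else s
     let s := if decide (c ∈ point2) then s + 2 else s
     let s := if decide (c ∈ point3) then s + 3 else s
     if decide (c ∈ point4) then s + 4 else s) = s + pvPoints.getD c 0 := by
  by_cases h : c ∈ (['a','e','h','i','n','o','r','s','t','c','d','l','m','u',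
      'b','f','g','p','v','w','y','j','k','q','x','z'] : List Char)
  · fin_cases h <;> rfl
  · simp only [List.mem_cons, List.not_mem_nil, or_false, not_or] at h
    obtain ⟨h1,h2,h3,h4,h5,h6,h7,h8,h9,h10,h11,h12,h13,h14,h15,h16,h17,h18,h19,h20,h21,h22,h23,h24,h25,h26⟩ := h
    have hit : pvPoints.items =
        [('a',(1:Int)),('e',1),('h',1),('i',1),('n',1),('o',1),('r',1),('s',1),('t',1),
         ('c',2),('d',2),('l',2),('m',2),('u',2),
         ('b',3),('f',3),('g',3),('p',3),('v',3),('w',3),('y',3),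
         ('j',4),('k',4),('q',4),('x',4),('z',4)] := by rfl
    simp [PySem.Dict.getD, PySem.Dict.get?, hit, beq_iff_eq,
      h1,h2,h3,h4,h5,h6,h7,h8,h9,h10,h11,h12,h13,h14,h15,h16,h17,h18,h19,h20,h21,h22,h23,h24,h25,h26,
      Ne.symm h1, Ne.symm h2, Ne.symm h3, Ne.symm h4, Ne.symm h5, Ne.symm h6, Ne.symm h7,
      Ne.symm h8, Ne.symm h9, Ne.symm h10, Ne.symm h11, Ne.symm h12, Ne.symm h13, Ne.symm h14,
      Ne.symm h15, Ne.symm h16, Ne.symm h17, Ne.symm h18, Ne.symm h19, Ne.symm h20, Ne.symm h21,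
      Ne.symm h22, Ne.symm h23, Ne.symm h24, Ne.symm h25, Ne.symm h26]

lemma pvPoints_nonneg (c : Char) : 0 ≤ pvPoints.getD c 0 := by
  have h := pvStep_eq 0 c
  simp only [zero_add] at h
  rw [← h]
  split_ifs <;> omega

lemma pvCountScore_eq (w : String) : pvCountScore w = pvScore w := by
  unfold pvCountScore pvScore
  suffices h : ∀ (l : List Char) (s : Int),
      l.foldl (fun score char =>
        let point1 : List Char := ['a','e','h','i','n','o','r','s','t']
        let point2 : List Char := ['c','d','l','m','u']
        let point3 : List Char := ['b','f','g','p','v','w','y']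
        let point4 : List Char := ['j','k','q','x','z']
        let score := if decide (char ∈ point1) then score + 1 else score
        let score := if decide (char ∈ point2) then score + 2 else score
        let score := if decide (char ∈ point3) then score + 3 else score
        if decide (char ∈ point4) then score + 4 else score) s
      = s + (l.map (fun ch => pvPoints.getD ch 0)).sum by
    simpa using h w.toList 0
  intro l
  induction l with
  | nil => intro s; simp
  | cons c t ih =>
    intro s
    simp only [List.foldl_cons, List.map_cons, List.sum_cons]
    rw [ih, pvStep_eq]
    ring

lemma pvScore_nonneg (w : String) : 0 ≤ pvScore w := by
  unfold pvScore
  induction w.toList with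
  | nil => simp
  | cons c t ih =>
    simp only [List.map_cons, List.sum_cons]
    have := pvPoints_nonneg c
    omega

-- A's key-wise validity test, in pure counting form
lemma pvValidA_eq_count (rw w : String) :
    ((PySem.Dict.counter w.toList).keys.all
      (fun k => !decide ((PySem.Dict.counter w.toList).getD k 0 > (PySem.Dict.counter rw.toList).getD k 0)))
    = decide (∀ x : Char, w.toList.count x ≤ rw.toList.count x) := by
  rw [Bool.eq_iff_iff]
  simp only [List.all_eq_true, PySem.Dict.keys_counter, PySem.Dict.getD_counter,
    PySem.Set.mem_ofList, Bool.not_eq_eq_eq_not, Bool.not_true, decide_eq_false_iff_not,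
    not_lt, decide_eq_true_eq, Int.ofNat_le]
  constructor
  · intro h x
    by_cases hx : x ∈ w.toList
    · exact h x hx
    · simp [List.count_eq_zero.mpr hx]
  · intro h x _
    exact h x

-- the two-pointer scan over sorted lists decides count-wise containment
lemma pvFits_iff (s t : List Char) (hs : s.Pairwise (· ≤ ·)) (ht : t.Pairwise (· ≤ ·)) :
    pvFits s t = true ↔ ∀ x : Char, s.count x ≤ t.count x := by
  induction s generalizing t with
  | nil => simp [pvFits]
  | cons c ws ih =>
    have hws : ∀ x ∈ ws, c ≤ x := (List.pairwise_cons.mp hs).1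
    have hws' : ws.Pairwise (· ≤ ·) := (List.pairwise_cons.mp hs).2
    have htsplit : t.takeWhile (fun h => decide (h < c)) ++ t.dropWhile (fun h => decide (h < c)) = t :=
      List.takeWhile_append_dropWhile
    have htk : ∀ y ∈ t.takeWhile (fun h => decide (h < c)), y < c := by
      intro y hy
      simpa using List.mem_takeWhile_imp hy
    have hctk : (t.takeWhile (fun h => decide (h < c))).count c = 0 :=
      List.count_eq_zero.mpr (fun hc => absurd (htk c hc) (lt_irrefl c))
    have hdrp : (t.dropWhile (fun h => decide (h < c))).Pairwise (· ≤ ·) :=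
      List.Pairwise.sublist (List.dropWhile_sublist _) ht
    rcases hdr : t.dropWhile (fun h => decide (h < c)) with _ | ⟨h, rest⟩
    · -- no character ≥ c remains: fits is false, and the count of c witnesses the failure
      have : pvFits (c :: ws) t = false := by
        simp only [pvFits, hdr]
      rw [this]
      simp only [Bool.false_eq_true, false_iff, Classical.not_forall, not_le]
      refine ⟨c, ?_⟩
      have : t.count c = (t.takeWhile (fun h => decide (h < c))).count c := by
        conv_lhs => rw [← htsplit]
        rw [List.count_append, hdr]
        simp
      rw [this, hctk]
      simp [List.count_cons_self]
    · have hch : ¬ (h < c) := by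
        have := List.head?_dropWhile_not (fun h => decide (h < c)) t
        rw [hdr] at this
        simpa using this
      have hrest : ∀ y ∈ rest, h ≤ y := (List.pairwise_cons.mp (hdr ▸ hdrp)).1
      have hrestP : rest.Pairwise (· ≤ ·) := (List.pairwise_cons.mp (hdr ▸ hdrp)).2
      by_cases hhc : h = c
      · subst hhc
        have : pvFits (h :: ws) t = pvFits ws rest := by
          simp only [pvFits, hdr, BEq.rfl, if_true]
        rw [this, ih rest hws' hrestP]
        constructor
        · intro hcnt x
          have h1 := hcnt x
          conv_rhs => rw [← htsplit, hdr]
          rw [List.count_append]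
          by_cases hx : x = h
          · subst hx
            simp only [List.count_cons_self, hctk]
            omega
          · rw [List.count_cons_of_ne (by simpa using Ne.symm hx),
                List.count_cons_of_ne (by simpa using Ne.symm hx)]
            omega
        · intro hcnt x
          by_cases hxw : x ∈ ws
          · have hcx : h ≤ x := hws x hxw
            have h1 := hcnt x
            rw [← htsplit, hdr, List.count_append] at h1
            have htk0 : (t.takeWhile (fun h' => decide (h' < h))).count x = 0 :=
              List.count_eq_zero.mpr (fun hc => absurd (lt_of_lt_of_le (htk x hc) hcx) (lt_irrefl x))
            rw [htk0] at h1
            by_cases hx : x = h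
            · subst hx
              simp only [List.count_cons_self] at h1
              omega
            · rw [List.count_cons_of_ne (by simpa using Ne.symm hx),
                  List.count_cons_of_ne (by simpa using Ne.symm hx)] at h1
              omega
          · simp [List.count_eq_zero.mpr hxw]
      · -- next available character overshoots c: fits is false, count of c witnesses the failure
        have hlt : c < h := lt_of_le_of_ne (not_lt.mp hch) (Ne.symm hhc)
        have : pvFits (c :: ws) t = false := by
          simp only [pvFits, hdr]
          simp [hhc]
        rw [this]
        simp only [Bool.false_eq_true, false_iff, Classical.not_forall, not_le]
        refine ⟨c, ?_⟩
        have hc0 : t.count c = 0 := by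
          conv_lhs => rw [← htsplit, hdr]
          rw [List.count_append, hctk,
            List.count_cons_of_ne (by simpa using hlt.ne'),
            List.count_eq_zero.mpr (fun hc => absurd (lt_of_lt_of_le hlt (hrest c hc)) (lt_irrefl c))]
        rw [hc0]
        simp [List.count_cons_self]

-- B's sorted two-pointer validity equals A's counter validity
lemma pvValid_eq (rw w : String) :
    pvFits (PySem.List.sorted w.toList (fun c => c) false) (PySem.List.sorted rw.toList (fun c => c) false)
    = ((PySem.Dict.counter w.toList).keys.all
      (fun k => !decide ((PySem.Dict.counter w.toList).getD k 0 > (PySem.Dict.counter rw.toList).getD k 0))) := by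
  rw [pvValidA_eq_count, Bool.eq_iff_iff,
    pvFits_iff _ _ (PySem.List.sorted_pairwise w.toList (fun c => c))
      (PySem.List.sorted_pairwise rw.toList (fun c => c))]
  simp only [decide_eq_true_eq]
  constructor
  · intro h x
    have := h x
    rwa [(PySem.List.sorted_perm w.toList (fun c => c) false).count_eq,
      (PySem.List.sorted_perm rw.toList (fun c => c) false).count_eq] at this
  · intro h x
    rw [(PySem.List.sorted_perm w.toList (fun c => c) false).count_eq,
      (PySem.List.sorted_perm rw.toList (fun c => c) false).count_eq]
    exact h x

-- the loop invariant of A's fold: snd is the running max of valid scores (floored at 0),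
-- fst is "" while it is 0 and the first achiever of the max once it is positive
lemma pvLoop_inv (p : String → Bool) (f : String → Int) (hf : ∀ w, 0 ≤ f w) (l : List String) :
    (l.foldl (fun st w => if p w && decide (st.2 < f w) then (w, f w) else st) (("", (0:Int)))).2
        = ((l.filter p).map f).foldl max 0
    ∧ ((l.foldl (fun st w => if p w && decide (st.2 < f w) then (w, f w) else st) (("", (0:Int)))).2 = 0
        → (l.foldl (fun st w => if p w && decide (st.2 < f w) then (w, f w) else st) (("", (0:Int)))).1 = "")
    ∧ (0 < (l.foldl (fun st w => if p w && decide (st.2 < f w) then (w, f w) else st) (("", (0:Int)))).2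
        → (l.filter p).find?
            (fun w => f w == (l.foldl (fun st w => if p w && decide (st.2 < f w) then (w, f w) else st) (("", (0:Int)))).2)
          = some (l.foldl (fun st w => if p w && decide (st.2 < f w) then (w, f w) else st) (("", (0:Int)))).1) := by
  induction l using List.reverseRecOn with
  | nil => simp
  | append_singleton t w ih =>
    obtain ⟨ih1, ih2, ih3⟩ := ih
    rw [List.foldl_append] at *
    set st := t.foldl (fun st w => if p w && decide (st.2 < f w) then (w, f w) else st) (("", (0:Int))) with hst
    have hmax : ∀ y ∈ (t.filter p).map f, y ≤ st.2 := by
      rw [ih1]; exact (PySem.List.le_foldl_max _ _).2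
    have hnn : 0 ≤ st.2 := by
      rw [ih1]; exact (PySem.List.le_foldl_max _ _).1
    by_cases hp : p w
    · have hfil : (t ++ [w]).filter p = t.filter p ++ [w] := by simp [List.filter_append, hp]
      by_cases hlt : st.2 < f w
      · -- new maximum: w becomes the result
        have hstep : (if (p w && decide (st.2 < f w)) = true then (w, f w) else st) = (w, f w) := by
          simp [hp, hlt]
        simp only [List.foldl_cons, List.foldl_nil, hstep]
        rw [hfil]
        refine ⟨by simp [List.foldl_append, max_eq_right (le_of_lt (ih1 ▸ hlt))], ?_, ?_⟩
        · intro h0; have := hf w; omega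
        · intro _
          rw [List.find?_append]
          have hnone : (t.filter p).find? (fun u => f u == f w) = none := by
            rw [List.find?_eq_none]
            intro u hu
            have : f u ≤ st.2 := hmax _ (List.mem_map_of_mem hu)
            simp only [beq_iff_eq]
            omega
          simp [hnone]
      · -- not an improvement: state unchanged
        have hstep : (if (p w && decide (st.2 < f w)) = true then (w, f w) else st) = st := by
          simp [hp, hlt]
        simp only [List.foldl_cons, List.foldl_nil, hstep]
        rw [hfil]
        have hle : f w ≤ st.2 := by omega
        refine ⟨by simp [List.foldl_append, ih1, max_eq_left (ih1 ▸ hle)], ih2, ?_⟩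
        · intro hpos
          rw [List.find?_append, ih3 hpos]
          simp
    · have hfil : (t ++ [w]).filter p = t.filter p := by simp [List.filter_append, hp]
      have hstep : (if (p w && decide (st.2 < f w)) = true then (w, f w) else st) = st := by
        simp [hp]
      simp only [List.foldl_cons, List.foldl_nil, hstep]
      rw [hfil]
      exact ⟨ih1, ih2, ih3⟩

-- insertBy splits its target at the first element the new one goes before
lemma pvInsertBy_eq {α : Type} (before : α → α → Bool) (x : α) (ys : List α) :
    PySem.List.insertBy before x ys
      = ys.takeWhile (fun y => !before x y) ++ x :: ys.dropWhile (fun y => !before x y) := by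
  induction ys with
  | nil => simp [PySem.List.insertBy]
  | cons y t ih =>
    by_cases h : before x y
    · simp [PySem.List.insertBy, h]
    · simp [PySem.List.insertBy, h, ih]

-- stability at one key: the stable descending sort keeps the key-m elements in original order
lemma pvSortedRev_filter_key (f : String → Int) (l : List String) (m : Int) :
    (PySem.List.sorted l f true).filter (fun x => f x == m) = l.filter (fun x => f x == m) := by
  induction l using List.reverseRecOn with
  | nil => simp [PySem.List.sorted]
  | append_singleton t w ih =>
    have hstep : PySem.List.sorted (t ++ [w]) f true
        = PySem.List.insertBy (fun a b => decide (f b < f a)) w (PySem.List.sorted t f true) := by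
      rw [PySem.List.sorted_rev_eq_foldl_insertBy, PySem.List.sorted_rev_eq_foldl_insertBy,
        List.foldl_append]
      simp
    set ys := PySem.List.sorted t f true with hys
    have hpair : ys.Pairwise (fun a b => f b ≤ f a) := PySem.List.sorted_pairwise_rev t f
    have hdrlt : ∀ y ∈ ys.dropWhile (fun y => !decide (f y < f w)), f y < f w := by
      rcases hdr : ys.dropWhile (fun y => !decide (f y < f w)) with _ | ⟨h, rest⟩
      · simp
      · have hh : f h < f w := by
          have := List.head?_dropWhile_not (fun y => !decide (f y < f w)) ys
          rw [hdr] at this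
          simpa using this
        have hsub : (h :: rest).Pairwise (fun a b => f b ≤ f a) :=
          hdr ▸ List.Pairwise.sublist (List.dropWhile_sublist _) hpair
        intro y hy
        rcases List.mem_cons.mp hy with rfl | hy'
        · exact hh
        · exact lt_of_le_of_lt ((List.pairwise_cons.mp hsub).1 y hy') hh
    rw [hstep, pvInsertBy_eq, List.filter_append, List.filter_cons, List.filter_append,
      List.filter_cons, List.filter_nil]
    by_cases hm : f w == m
    · have hwm : f w = m := by simpa using hm
      have hdr0 : (ys.dropWhile (fun y => !decide (f y < f w))).filter (fun x => f x == m) = [] := by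
        rw [List.filter_eq_nil_iff]
        intro y hy
        have := hdrlt y hy
        simp only [beq_iff_eq]
        omega
      rw [hdr0, hm]
      simp only [if_true]
      rw [← ih]
      conv_rhs => rw [← List.takeWhile_append_dropWhile (p := fun y => !decide (f y < f w)) (l := ys)]
      rw [List.filter_append, hdr0]
      simp
    · simp only [hm, Bool.false_eq_true, if_false, List.append_nil]
      rw [← ih]
      conv_rhs => rw [← List.takeWhile_append_dropWhile (p := fun y => !decide (f y < f w)) (l := ys)]
      rw [List.filter_append]

-- a fold of max stays below any common upper bound
lemma pvFoldlMax_le (xs : List Int) (c : Int) (h : ∀ x ∈ xs, x ≤ c) :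
    ∀ a, a ≤ c → xs.foldl max a ≤ c := by
  induction xs with
  | nil => intro a ha; simpa
  | cons x t ih =>
    intro a ha
    simp only [List.foldl_cons]
    exact ih (fun y hy => h y (List.mem_cons_of_mem x hy)) (max a x) (max_le ha (h x List.mem_cons_self))

-- ===== VERDICT (by name: the statement is the Claim_ definition above) =====
theorem anagram2_solution_spec : Claim_equal_anagram2_solution := by
  intro random_word dictionary _
  unfold Spec_anagram2_solution anagram2_solution anagram2_solution_alt
  simp only []
  set p : String → Bool := (fun w =>
    pvFits (PySem.List.sorted w.toList (fun c => c) false)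
      (PySem.List.sorted random_word.toList (fun c => c) false)) with hpdef
  have hbody : (fun (st : String × Int) word =>
      if (((word.toList.foldl (fun d c => d.modify c 0 fun x => x + 1) (PySem.Dict.empty : PySem.Dict Char Int)).keys.all fun k =>
            !decide ((word.toList.foldl (fun d c => d.modify c 0 fun x => x + 1) (PySem.Dict.empty : PySem.Dict Char Int)).getD k 0 >
              (random_word.toList.foldl (fun d c => d.modify c 0 fun x => x + 1) (PySem.Dict.empty : PySem.Dict Char Int)).getD k 0))
          && decide (st.2 < pvCountScore word)) = true
      then (word, pvCountScore word) else st)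
      = (fun (st : String × Int) w =>
          if (p w && decide (st.2 < pvScore w)) = true then (w, pvScore w) else st) := by
    funext st w
    have e1 : (w.toList.foldl (fun d c => d.modify c 0 fun x => x + 1) (PySem.Dict.empty : PySem.Dict Char Int))
        = PySem.Dict.counter w.toList := rfl
    have e2 : (random_word.toList.foldl (fun d c => d.modify c 0 fun x => x + 1) (PySem.Dict.empty : PySem.Dict Char Int))
        = PySem.Dict.counter random_word.toList := rfl
    rw [e1, e2, ← pvValid_eq, pvCountScore_eq, hpdef]
  rw [hbody]
  obtain ⟨h1, h2, h3⟩ := pvLoop_inv p pvScore pvScore_nonneg dictionary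
  set st := dictionary.foldl
    (fun st w => if (p w && decide (st.2 < pvScore w)) = true then (w, pvScore w) else st) (("", (0:Int))) with hst
  rcases hfind : (PySem.List.sorted dictionary pvScore true).find? p with _ | w
  · -- no word fits: A's filter is empty, its max stays 0, both return ""
    have hnone : ∀ u ∈ dictionary, ¬ p u = true := by
      intro u hu
      exact List.find?_eq_none.mp hfind u ((PySem.List.mem_sorted dictionary pvScore true u).mpr hu)
    have hfil : dictionary.filter p = [] := List.filter_eq_nil_iff.mpr hnone
    have h0 : st.2 = 0 := by rw [h1, hfil]; simp
    exact h2 h0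
  · obtain ⟨hpw, asl, bsl, hsplit, has⟩ := List.find?_eq_some_iff_append.mp hfind
    have hwmem : w ∈ dictionary := by
      rw [← PySem.List.mem_sorted dictionary pvScore true w, hsplit]
      exact List.mem_append_right asl (List.mem_cons_self)
    have hpair : (PySem.List.sorted dictionary pvScore true).Pairwise (fun a b => pvScore b ≤ pvScore a) :=
      PySem.List.sorted_pairwise_rev dictionary pvScore
    rw [hsplit] at hpair
    have hbs : ∀ y ∈ bsl, pvScore y ≤ pvScore w :=
      (List.pairwise_cons.mp (List.pairwise_append.mp hpair).2.1).1
    -- every fitting word scores at most pvScore w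
    have hall : ∀ u ∈ dictionary, p u = true → pvScore u ≤ pvScore w := by
      intro u hu hpu
      have : u ∈ asl ++ w :: bsl := by
        rw [← hsplit]; exact (PySem.List.mem_sorted dictionary pvScore true u).mpr hu
      rcases List.mem_append.mp this with ha | hb
      · exact absurd hpu (by simpa using has u ha)
      · rcases List.mem_cons.mp hb with rfl | hb'
        · exact le_refl _
        · exact hbs u hb'
    -- hence A's running max is exactly pvScore w
    have hM : st.2 = pvScore w := by
      rw [h1]
      have hle : ((dictionary.filter p).map pvScore).foldl max 0 ≤ pvScore w := by
        refine pvFoldlMax_le _ _ ?_ 0 (pvScore_nonneg w)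
        intro x hx
        obtain ⟨u, hu, rfl⟩ := List.mem_map.mp hx
        exact hall u (List.mem_of_mem_filter hu) (List.of_mem_filter hu)
      have hge : pvScore w ≤ ((dictionary.filter p).map pvScore).foldl max 0 :=
        (PySem.List.le_foldl_max _ _).2 _
          (List.mem_map_of_mem (List.mem_filter.mpr ⟨hwmem, hpw⟩))
      omega
    show st.1 = if pvScore w > 0 then w else ""
    by_cases hpos : pvScore w > 0
    · rw [if_pos (by simpa using hpos)]
      have hstpos : 0 < st.2 := by omega
      have hfd := h3 hstpos
      rw [hM] at hfd
      -- A's first max-score fitting word is w, by stability of the descending sort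
      have hkey : (dictionary.filter p).find? (fun u => pvScore u == pvScore w) = some w := by
        rw [List.find?_filter]
        have hcongr : (fun a => decide (p a = true ∧ (pvScore a == pvScore w) = true))
            = (fun a => decide (((pvScore a == pvScore w) = true) ∧ p a = true)) := by
          funext a
          simp [and_comm]
        rw [hcongr, ← List.find?_filter, ← pvSortedRev_filter_key pvScore dictionary (pvScore w),
          List.find?_filter, hsplit, List.find?_append]
        have hnone : asl.find? (fun a => decide (((pvScore a == pvScore w) = true) ∧ p a = true)) = none := by
          rw [List.find?_eq_none]
          intro a ha
          simp only [decide_eq_true_eq, not_and]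
          intro _
          simpa using has a ha
        rw [hnone]
        simp [hpw]
      rw [hkey] at hfd
      exact (Option.some_inj.mp hfd).symm
    · -- the best fitting word scores 0: both sides return ""
      rw [if_neg (by simpa using hpos)]
      have h0 : st.2 = 0 := by
        have := pvScore_nonneg w
        omega
      exact h2 h0
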